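-- pv_equiv track=rewrite | github.com/Pun2341/Acoustic-Explorer | display.py | calc_piano_key_pressed
-- ===== SOURCE A (Python) =====
-- PIANO_LOCATION = [120, 600]
--
-- WHITE_KEY_DIMS = [50, 200]
--
-- BLACK_KEY_DIMS = [30, 110]
--
-- NUM_OCTAVES = 2
--
-- def calc_piano_key_x(n, x):
--     drawx = x + ((n // 2) * WHITE_KEY_DIMS[0])
--     if n % 2 == 0:
--         return drawx
--     else:
--         black_x_component = WHITE_KEY_DIMS[0] // 2 + BLACK_KEY_DIMS[0] // 3
--         return drawx + black_x_component
--
-- def octave_width():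
--     return WHITE_KEY_DIMS[0] * 7
--
-- def piano_width():
--     return octave_width() * NUM_OCTAVES
--
-- def calc_piano_key_pressed(x, y):
--     px, py = PIANO_LOCATION
--     x = x - px
--     y = y - py
--     if x > piano_width() or y > WHITE_KEY_DIMS[1] or x < 0 or y < 0:
--         return -1
--     numkeys = 14 * NUM_OCTAVES
--
--     # Need to calc white, black keys separately bc of overlap
--     whitekey = -1
--     for i in range(0, numkeys, 2):
--         if x >= calc_piano_key_x(i, 0):
--             if i == numkeys - 1 or x < calc_piano_key_x(i + 2, 0):
--                 whitekey = i
--     blackkey = -1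
--     for i in range(1, numkeys, 2):
--         piano_key_x = calc_piano_key_x(i, 0)
--         if i % 14 not in [5, 13]:
--             if piano_key_x + BLACK_KEY_DIMS[0] > x >= piano_key_x and \
--                                                         y < BLACK_KEY_DIMS[1]:
--                 if i == numkeys - 1 or x < calc_piano_key_x(i + 2, 0):
--                     blackkey = i
--     return blackkey if blackkey != -1 else whitekey
-- ===== SOURCE B (Python) =====
-- PIANO_LOCATION = [120, 600]
-- WHITE_KEY_DIMS = [50, 200]
-- BLACK_KEY_DIMS = [30, 110]
-- NUM_OCTAVES = 2
--
-- def calc_piano_key_pressed(x, y):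
--     x -= PIANO_LOCATION[0]
--     y -= PIANO_LOCATION[1]
--     if x > 700 or y > 200 or x < 0 or y < 0:
--         return -1
--     w = x // 50
--     j = (x - 35) // 50
--     if x - 35 >= 0 and (x - 35) - 50 * j < 30 and y < 110 and j not in (2, 6, 9, 13):
--         return 2 * j + 1
--     return 2 * w if w < 14 else -1
-- ===== Notes on version B (the rewrite author's own statement) =====
-- stated objective: simpler
-- what changed: Replaces A's two linear scans over all 28 keys (each re-calling calc_piano_key_x) with direct division: white key = 2*(x//50), black key = 2*((x-35)//50)+1 guarded by the 30-px offset range, y < 110 and the no-black-key positions {2,6,9,13}.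
import Mathlib
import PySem

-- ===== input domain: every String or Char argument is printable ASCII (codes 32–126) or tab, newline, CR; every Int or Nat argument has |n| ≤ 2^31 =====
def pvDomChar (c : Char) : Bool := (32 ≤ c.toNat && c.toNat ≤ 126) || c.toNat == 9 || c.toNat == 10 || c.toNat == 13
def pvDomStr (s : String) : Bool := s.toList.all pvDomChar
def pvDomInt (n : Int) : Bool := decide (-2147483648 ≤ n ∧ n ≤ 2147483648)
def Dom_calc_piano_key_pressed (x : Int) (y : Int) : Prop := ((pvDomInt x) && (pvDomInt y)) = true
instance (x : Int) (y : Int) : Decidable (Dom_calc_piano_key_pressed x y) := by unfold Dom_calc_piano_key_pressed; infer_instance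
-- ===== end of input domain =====

-- ===== PORT A =====
-- B computes the clicked key by direct division instead of A's two scans over all 28 keys (objective: simpler).
-- helpers of A (constants inlined: PIANO_LOCATION=[120,600], WHITE_KEY_DIMS=[50,200], BLACK_KEY_DIMS=[30,110], NUM_OCTAVES=2)
def pv_calc_piano_key_x (n : Int) (x : Int) : Int :=
  let drawx := x + (PySem.Int.floordiv n 2) * 50
  if PySem.Int.mod n 2 = 0 then drawx
  else drawx + (PySem.Int.floordiv 50 2 + PySem.Int.floordiv 30 3)

def pv_octave_width : Int := 50 * 7
def pv_piano_width : Int := pv_octave_width * 2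

-- the first 'for i in range(0, numkeys, 2)' loop of A
def pvWhiteLoop (x : Int) : Int :=
  List.foldl (fun acc i =>
    if x ≥ pv_calc_piano_key_x i 0 then
      (if i = 28 - 1 ∨ x < pv_calc_piano_key_x (i + 2) 0 then i else acc)
    else acc) (-1) (PySem.List.pyRange 0 28 2)

-- the second 'for i in range(1, numkeys, 2)' loop of A
def pvBlackLoop (x : Int) (y : Int) : Int :=
  List.foldl (fun acc i =>
    let piano_key_x := pv_calc_piano_key_x i 0
    if ¬(PySem.Int.mod i 14 = 5 ∨ PySem.Int.mod i 14 = 13) then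
      (if (piano_key_x + 30 > x ∧ x ≥ piano_key_x) ∧ y < 110 then
        (if i = 28 - 1 ∨ x < pv_calc_piano_key_x (i + 2) 0 then i else acc)
      else acc)
    else acc) (-1) (PySem.List.pyRange 1 28 2)

def calc_piano_key_pressed (x : Int) (y : Int) : Int :=
  let x := x - 120
  let y := y - 600
  if x > pv_piano_width ∨ y > 200 ∨ x < 0 ∨ y < 0 then -1
  else
    let whitekey := pvWhiteLoop x
    let blackkey := pvBlackLoop x y
    if ¬(blackkey = -1) then blackkey else whitekey

-- ===== PORT B =====
def calc_piano_key_pressed_alt (x : Int) (y : Int) : Int :=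
  let x := x - 120
  let y := y - 600
  if x > 700 ∨ y > 200 ∨ x < 0 ∨ y < 0 then -1
  else
    let w := PySem.Int.floordiv x 50
    let j := PySem.Int.floordiv (x - 35) 50
    if 0 ≤ x - 35 ∧ (x - 35) - 50 * j < 30 ∧ y < 110 ∧ ¬(j = 2 ∨ j = 6 ∨ j = 9 ∨ j = 13) then
      2 * j + 1
    else if w < 14 then 2 * w else -1
-- ===== PRECONDITION & SPEC =====
def Spec_calc_piano_key_pressed (x : Int) (y : Int) (out : Int) : Prop := out = calc_piano_key_pressed_alt x y
instance (x : Int) (y : Int) (out : Int) : Decidable (Spec_calc_piano_key_pressed x y out) := by unfold Spec_calc_piano_key_pressed; infer_instance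

-- ===== CLAIM (what is proved, stated in full; the proofs are below) =====
def Claim_equal_calc_piano_key_pressed : Prop := ∀ (x : Int) (y : Int), Dom_calc_piano_key_pressed x y → Spec_calc_piano_key_pressed x y (calc_piano_key_pressed x y)

-- ===== LEMMAS AND PROOFS =====


lemma pvBlackLoop_high (x y : Int) (hy : ¬ y < 110) : pvBlackLoop x y = -1 := by
  simp [pvBlackLoop, PySem.List.pyRange, hy]

lemma pvBlackLoop_low (x y : Int) (hy : y < 110) : pvBlackLoop x y = pvBlackLoop x 0 := by
  simp [pvBlackLoop, PySem.List.pyRange, hy]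

lemma pvWhite_eval (z : Int) (h0 : 0 ≤ z) (h1 : z ≤ 700) :
    pvWhiteLoop z = (if PySem.Int.floordiv z 50 < 14 then 2 * PySem.Int.floordiv z 50 else -1) := by
  interval_cases z <;> decide

lemma pvLow_eval (z : Int) (h0 : 0 ≤ z) (h1 : z ≤ 700) :
    (if ¬(pvBlackLoop z 0 = -1) then pvBlackLoop z 0 else pvWhiteLoop z)
      = (if 0 ≤ z - 35 ∧ (z - 35) - 50 * PySem.Int.floordiv (z - 35) 50 < 30 ∧
            ¬(PySem.Int.floordiv (z - 35) 50 = 2 ∨ PySem.Int.floordiv (z - 35) 50 = 6 ∨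
              PySem.Int.floordiv (z - 35) 50 = 9 ∨ PySem.Int.floordiv (z - 35) 50 = 13)
         then 2 * PySem.Int.floordiv (z - 35) 50 + 1
         else if PySem.Int.floordiv z 50 < 14 then 2 * PySem.Int.floordiv z 50 else -1) := by
  interval_cases z <;> decide

-- ===== VERDICT (by name: the statement is the Claim_ definition above) =====
theorem calc_piano_key_pressed_spec : Claim_equal_calc_piano_key_pressed := by
  intro x y _
  unfold Spec_calc_piano_key_pressed calc_piano_key_pressed calc_piano_key_pressed_alt
  by_cases hg : x - 120 > pv_piano_width ∨ y - 600 > 200 ∨ x - 120 < 0 ∨ y - 600 < 0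
  · have h700 : pv_piano_width = (700 : Int) := by norm_num [pv_piano_width, pv_octave_width]
    rw [h700] at hg
    simp only [h700]
    split_ifs <;> first | rfl | omega
  · have hg' : ¬(x - 120 > 700 ∨ y - 600 > 200 ∨ x - 120 < 0 ∨ y - 600 < 0) := by
      simpa [pv_piano_width, pv_octave_width] using hg
    simp only [hg, hg', ite_false]
    have h0 : 0 ≤ x - 120 := by omega
    have h1 : x - 120 ≤ 700 := by
      have : ¬ x - 120 > pv_piano_width := fun h => hg (Or.inl h)
      simpa [pv_piano_width, pv_octave_width] using this
    by_cases hy : y - 600 < 110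
    · rw [pvBlackLoop_low _ _ hy]
      have := pvLow_eval (x - 120) h0 h1
      simpa [hy] using this
    · rw [pvBlackLoop_high _ _ hy]
      have := pvWhite_eval (x - 120) h0 h1
      simpa [hy] using this
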